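-- pv_equiv track=rewrite | github.com/gigyesik/baekjoon_python | 08_basic_mathematics_1/2775.py | president
-- ===== SOURCE A (Python) =====
-- from copy import deepcopy
--
-- def president(k: int, n: int) -> int:
--     person = list(range(1, n+1))
--     floor = 0
--
--     while k > floor:
--         floor += 1
--         underfloor = deepcopy(person)
--         for i in range(len(person)):
--             person[i] = sum(underfloor[:i + 1])
--     return person[n - 1]
-- ===== SOURCE B (Python) =====
-- def president(k: int, n: int) -> int:
--     row = list(range(1, n + 1))
--     for _ in range(k):
--         s = 0
--         for i in range(n):
--             s += row[i]
--             row[i] = s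
--     return row[n - 1]
-- ===== Notes on version B (the rewrite author's own statement) =====
-- stated objective: faster
-- what changed: Each floor is computed by a single in-place running prefix-sum pass instead of a deep copy plus an O(n) slice-sum per room, dropping a factor of n.
import Mathlib
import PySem

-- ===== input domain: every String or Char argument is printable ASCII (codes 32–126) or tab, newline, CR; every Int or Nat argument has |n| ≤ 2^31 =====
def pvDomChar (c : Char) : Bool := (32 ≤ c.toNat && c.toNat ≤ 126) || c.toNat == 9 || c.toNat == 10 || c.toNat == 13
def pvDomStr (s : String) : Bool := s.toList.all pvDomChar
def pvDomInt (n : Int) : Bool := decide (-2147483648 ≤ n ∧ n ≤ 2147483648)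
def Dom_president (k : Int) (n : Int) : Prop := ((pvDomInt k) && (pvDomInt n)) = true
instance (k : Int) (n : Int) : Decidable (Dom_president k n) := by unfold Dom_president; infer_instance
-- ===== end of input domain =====

-- B replaces A's per-room deepcopy + slice-sum with one in-place running prefix-sum pass per floor.

-- ===== PORT A =====
-- one body of A's while loop: underfloor = deepcopy(person); for i in range(len(person)): person[i] = sum(underfloor[:i+1])
def presStepA (person : List Int) : List Int :=
  let underfloor := person
  (PySem.List.pyRange 0 (person.length : Int) 1).foldl
    (fun p i => PySem.List.pySetD p i ((PySem.List.slice underfloor none (some (i + 1))).sum)) person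

-- the while loop: while k > floor: floor += 1; <presStepA>
def presLoopA (k : Int) (floor : Int) (person : List Int) : List Int :=
  if k > floor then presLoopA k (floor + 1) (presStepA person) else person
termination_by (k - floor).toNat
decreasing_by omega

def president (k : Int) (n : Int) : Int :=
  let person := PySem.List.pyRange 1 (n + 1) 1
  PySem.List.pyGetD (presLoopA k 0 person) (n - 1) 0

-- ===== PORT B =====
-- one floor of B: s = 0; for i in range(n): s += row[i]; row[i] = s
def presPassB (row : List Int) (n : Int) : List Int :=
  ((PySem.List.pyRange 0 n 1).foldl
    (fun (st : Int × List Int) i =>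
      let s := st.1 + PySem.List.pyGetD st.2 i 0
      (s, PySem.List.pySetD st.2 i s)) (0, row)).2

def president_alt (k : Int) (n : Int) : Int :=
  let row := PySem.List.pyRange 1 (n + 1) 1
  let final := (PySem.List.pyRange 0 k 1).foldl (fun r _ => presPassB r n) row
  PySem.List.pyGetD final (n - 1) 0

-- ===== PRECONDITION & SPEC =====
-- Pre_: for n ≤ 0 the room list is empty and Python A raises IndexError at person[n-1].
def Pre_president (k : Int) (n : Int) : Prop := 1 ≤ n
instance (k : Int) (n : Int) : Decidable (Pre_president k n) := by unfold Pre_president; infer_instance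
def pvWitness_president : Int × Int := (3, 5)

def Spec_president (k : Int) (n : Int) (out : Int) : Prop := out = president_alt k n
instance (k : Int) (n : Int) (out : Int) : Decidable (Spec_president k n out) := by unfold Spec_president; infer_instance

-- ===== CLAIM (what is proved, stated in full; the proofs are below) =====
def Claim_equal_president : Prop := ∀ (k : Int) (n : Int), Dom_president k n → Pre_president k n → Spec_president k n (president k n)

-- ===== LEMMAS AND PROOFS =====

-- the mathematical content of one floor: room t becomes the sum of the first t+1 old rooms
def floorSpec (row : List Int) : List Int :=
  (List.range row.length).map (fun t => (row.take (t + 1)).sum)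

theorem floorSpec_length (row : List Int) : (floorSpec row).length = row.length := by
  simp [floorSpec]

theorem take_succ_set (l : List Int) (j : Nat) (v : Int) (h : j < l.length) :
    (l.set j v).take (j+1) = l.take j ++ [v] := by
  have hlen : (l.take j).length = j := by simp; omega
  rw [List.set_eq_take_cons_drop v h]
  rw [← hlen, List.take_append]
  simp

theorem take_succ_eq (row : List Int) (j : Nat) (h : j < row.length) :
    row.take (j+1) = row.take j ++ [row[j]] := by
  rw [List.take_add_one, List.getElem?_eq_getElem h]
  rfl

theorem set_at_prefix (pre rest : List Int) (x v : Int) :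
    (pre ++ x :: rest).set pre.length v = pre ++ v :: rest := by
  rw [List.set_append_right _ _ (Nat.le_refl _)]
  simp

theorem get_at_prefix (pre rest : List Int) (x : Int) :
    (pre ++ x :: rest).getD pre.length 0 = x := by
  rw [List.getD, List.getElem?_append_right (Nat.le_refl _)]
  simp

-- A's inner fold writes independent positions: it equals the map of g over the indices
theorem foldl_pySetD_map (g : Int → Int) :
    ∀ (m j : Nat) (p : List Int), p.length = j + m →
    (PySem.List.pyRange (j : Int) (p.length : Int) 1).foldl
      (fun q i => PySem.List.pySetD q i (g i)) p
    = p.take j ++ (List.range m).map (fun t : Nat => g ((j : Int) + (t : Int))) := by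
  intro m
  induction m with
  | zero =>
    intro j p h
    rw [show ((p.length : Nat) : Int) = (j : Int) by simp [h]]
    rw [PySem.List.pyRange_one_eq_nil (le_refl _)]
    rw [List.take_of_length_le (by omega)]
    simp
  | succ m ih =>
    intro j p h
    rw [PySem.List.pyRange_one_cons (by exact_mod_cast Nat.lt_of_lt_of_le (Nat.lt_succ_of_le (Nat.le_add_right j m)) (le_of_eq h.symm))]
    simp only [List.foldl_cons]
    rw [show PySem.List.pySetD p (j : Int) (g j) = p.set j (g j) from PySem.List.pySetD_natCast ..]
    have hl : (p.set j (g j)).length = p.length := by simp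
    have hcast : (j : Int) + 1 = ((j + 1 : Nat) : Int) := by push_cast; ring
    rw [show ((p.length : Nat) : Int) = ((p.set j (g j)).length : Int) by rw [hl], hcast]
    rw [ih (j+1) (p.set j (g j)) (by rw [hl, h]; omega)]
    rw [take_succ_set p j (g j) (by omega)]
    rw [List.range_succ_eq_map]
    simp only [List.map_cons, List.map_map, Nat.cast_zero, add_zero, List.append_assoc, List.singleton_append]
    congr 1
    congr 1
    refine List.map_congr_left fun t _ => ?_
    simp only [Function.comp]
    congr 1
    push_cast
    ring

theorem presStepA_eq_floorSpec (row : List Int) : presStepA row = floorSpec row := by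
  unfold presStepA floorSpec
  have h := foldl_pySetD_map (fun i => (PySem.List.slice row none (some (i+1))).sum)
      row.length 0 row (Nat.zero_add _).symm
  norm_num at h
  rw [h]
  refine List.map_congr_left fun t _ => ?_
  rw [show ((t : Int) + 1) = (((t+1 : Nat) : Nat) : Int) by push_cast; ring]
  rw [PySem.List.slice_to_natCast]

theorem presPassB_invariant (row : List Int) :
    ∀ (m j : Nat), row.length = j + m →
    ((PySem.List.pyRange (j : Int) (row.length : Int) 1).foldl
      (fun (st : Int × List Int) i =>
        let s := st.1 + PySem.List.pyGetD st.2 i 0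
        (s, PySem.List.pySetD st.2 i s))
      ((row.take j).sum,
        (List.range j).map (fun t => (row.take (t + 1)).sum) ++ row.drop j)).2
    = floorSpec row := by
  intro m
  induction m with
  | zero =>
    intro j h
    rw [show ((row.length : Nat) : Int) = (j : Int) by simp [h]]
    rw [PySem.List.pyRange_one_eq_nil (le_refl _)]
    simp only [List.foldl_nil]
    rw [List.drop_of_length_le (by omega)]
    unfold floorSpec
    rw [h]
    simp
  | succ m ih =>
    intro j h
    have hj : j < row.length := by omega
    have hpre : ((List.range j).map (fun t => (row.take (t + 1)).sum)).length = j := by simp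
    rw [PySem.List.pyRange_one_cons (by exact_mod_cast hj)]
    simp only [List.foldl_cons]
    have hdrop : row.drop j = row[j] :: row.drop (j+1) := List.drop_eq_getElem_cons hj
    have hget : PySem.List.pyGetD ((List.range j).map (fun t => (row.take (t + 1)).sum) ++ row.drop j) (j : Int) 0 = row[j] := by
      rw [PySem.List.pyGetD_natCast, hdrop]
      have hg := get_at_prefix ((List.range j).map (fun t => (row.take (t + 1)).sum)) (row.drop (j+1)) row[j]
      rwa [hpre] at hg
    have hsum : (row.take j).sum + row[j] = (row.take (j+1)).sum := by
      rw [take_succ_eq row j hj]; rw [List.sum_append]; simp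
    have hset : PySem.List.pySetD ((List.range j).map (fun t => (row.take (t + 1)).sum) ++ row.drop j) (j : Int) ((row.take (j+1)).sum) = (List.range (j+1)).map (fun t => (row.take (t + 1)).sum) ++ row.drop (j+1) := by
      rw [PySem.List.pySetD_natCast, hdrop]
      have hs := set_at_prefix ((List.range j).map (fun t => (row.take (t + 1)).sum)) (row.drop (j+1)) row[j] ((row.take (j+1)).sum)
      rw [hpre] at hs
      rw [hs, List.range_succ]
      simp
    rw [hget, hsum, hset]
    rw [show ((j : Int) + 1) = ((j+1 : Nat) : Int) by push_cast; ring]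
    exact ih (j+1) (by omega)

theorem presPassB_eq_floorSpec (row : List Int) (n : Int) (h : (row.length : Int) = n) :
    presPassB row n = floorSpec row := by
  unfold presPassB
  rw [← h]
  have hv := presPassB_invariant row row.length 0 (by omega)
  simpa using hv

theorem presLoopA_eq_foldB (n : Int) :
    ∀ (fuel : Nat) (k floor : Int), (k - floor).toNat = fuel →
    ∀ (p : List Int), (p.length : Int) = n →
    presLoopA k floor p = (PySem.List.pyRange floor k 1).foldl (fun r _ => presPassB r n) p := by
  intro fuel
  induction fuel with
  | zero =>
    intro k floor hf p _
    rw [presLoopA, if_neg (by omega)]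
    rw [PySem.List.pyRange_one_eq_nil (by omega)]
    rfl
  | succ fuel ih =>
    intro k floor hf p hp
    have hkf : floor < k := by omega
    rw [presLoopA, if_pos hkf]
    rw [PySem.List.pyRange_one_cons hkf]
    simp only [List.foldl_cons]
    rw [show presPassB p n = presStepA p by
      rw [presStepA_eq_floorSpec, presPassB_eq_floorSpec p n hp]]
    exact ih k (floor + 1) (by omega) (presStepA p)
      (by rw [presStepA_eq_floorSpec, floorSpec_length]; exact hp)

-- ===== VERDICT (by name: the statement is the Claim_ definition above) =====
theorem president_spec : Claim_equal_president := by
  intro k n _ hpre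
  unfold Spec_president president president_alt
  have hlen : ((PySem.List.pyRange 1 (n + 1) 1).length : Int) = n := by
    rw [PySem.List.length_pyRange_one]; unfold Pre_president at hpre; omega
  exact congrArg (fun l => PySem.List.pyGetD l (n - 1) 0)
    (presLoopA_eq_foldB n (k - 0).toNat k 0 rfl _ hlen)
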